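-- pv_equiv track=rewrite | github.com/ameertg/formalising_arg_schemes | formalisation/isabelle_formaliser.py | _parse_logical_result
-- ===== SOURCE A (Python) =====
-- def _parse_logical_result(result: str) -> tuple:
--     """Parse a single logical proposition result into props and relations."""
--     props = {}
--     relations = []
--     mode = None
--
--     lines = result.strip().split('\n')
--     for line in lines:
--         line = line.strip()
--         if not line:
--             continue
--         if 'Logical Propositions:' in line:
--             mode = 'propositions'
--             continue
--         elif 'Logical Relations:' in line:
--             mode = 'relations'
--             continue
--
--         if mode == 'propositions' and ':' in line:
--             parts = line.split(':', 1)
--             if len(parts) == 2: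
--                 key = parts[0].strip()
--                 value = parts[1].strip()
--                 if key and value:
--                     props[key] = value
--         elif mode == 'relations':
--             if line and not line.lower().startswith('none'):
--                 relations.append(line)
--
--     return props, relations
-- ===== SOURCE B (Python) =====
-- def _parse_logical_result(result: str) -> tuple:
--     """Partition the lines into labelled sections first, then build props and
--     relations in two focused passes over the sections."""
--     sections = []
--     current = None
--     for raw in result.strip().split('\n'):
--         line = raw.strip()
--         if 'Logical Propositions:' in line:
--             if current is not None:
--                 sections.append(current)
--             current = ('propositions', [])
--         elif 'Logical Relations:' in line:
--             if current is not None: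
--                 sections.append(current)
--             current = ('relations', [])
--         elif line and current is not None:
--             current = (current[0], current[1] + [line])
--     if current is not None:
--         sections.append(current)
--
--     props = {}
--     for label, body in sections:
--         if label == 'propositions':
--             for line in body:
--                 if ':' in line:
--                     left, right = line.split(':', 1)
--                     key = left.strip()
--                     value = right.strip()
--                     if key and value:
--                         props[key] = value
--
--     relations = [line
--                  for label, body in sections if label == 'relations'
--                  for line in body if not line.lower().startswith('none')]
--     return props, relations
-- ===== Notes on version B (the rewrite author's own statement) =====
-- stated objective: alternative
-- what changed: A is one stateful pass mixing header detection, mode tracking and both outputs; B first partitions the lines into labelled sections and then builds props and relations in two separate focused passes over the sections.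
import Mathlib
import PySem

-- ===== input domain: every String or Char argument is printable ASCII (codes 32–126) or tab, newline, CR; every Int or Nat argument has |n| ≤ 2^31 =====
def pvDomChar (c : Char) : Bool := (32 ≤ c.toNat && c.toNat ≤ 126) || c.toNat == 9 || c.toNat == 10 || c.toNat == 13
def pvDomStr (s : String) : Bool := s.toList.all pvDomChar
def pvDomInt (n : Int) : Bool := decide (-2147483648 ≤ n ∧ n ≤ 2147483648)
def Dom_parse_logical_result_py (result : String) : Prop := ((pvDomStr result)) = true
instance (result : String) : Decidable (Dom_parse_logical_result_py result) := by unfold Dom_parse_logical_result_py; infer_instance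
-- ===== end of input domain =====

-- B restructures A's single stateful pass into a partition-into-labelled-sections pass followed
-- by two focused output passes; same O(n) cost, same results (objective: alternative).

-- ===== PORT A =====
-- A's loop body after `line = line.strip()`; the loop state is (props dict, relations, mode).
def pvStepAL (st : PySem.Dict String String × List String × Option String) (line : String) :
    PySem.Dict String String × List String × Option String :=
  if line = "" then st
  else if PySem.Str.isIn "Logical Propositions:" line then (st.1, st.2.1, some "propositions")
  else if PySem.Str.isIn "Logical Relations:" line then (st.1, st.2.1, some "relations")
  else if st.2.2 = some "propositions" ∧ PySem.Str.isIn ":" line then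
    match PySem.Str.splitMax? line ":" 1 with   -- ':' ≠ "": never none; 2 parts since ':' ∈ line
    | some [p0, p1] =>
        if PySem.Str.strip p0 ≠ "" ∧ PySem.Str.strip p1 ≠ "" then
          (st.1.insert (PySem.Str.strip p0) (PySem.Str.strip p1), st.2.1, st.2.2)
        else st
    | _ => st
  else if st.2.2 = some "relations" then
    if line ≠ "" ∧ ¬ PySem.Str.startswith (PySem.Str.lower line) "none" then
      (st.1, st.2.1 ++ [line], st.2.2)
    else st
  else st

def pvStepA (st : PySem.Dict String String × List String × Option String) (raw : String) :
    PySem.Dict String String × List String × Option String :=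
  pvStepAL st (PySem.Str.strip raw)

def parse_logical_result_py (result : String) : (List (String × String)) × List String :=
  let lines := (PySem.Str.split? (PySem.Str.strip result) "\n").getD []  -- sep "\n" ≠ "": never none
  let fin := lines.foldl pvStepA (PySem.Dict.empty, [], none)
  (fin.1.items, fin.2.1)

-- ===== PORT B =====
-- pass 1: partition into labelled sections; state = (finished sections, current section or none).
def pvStepSecL (st : List (String × List String) × Option (String × List String)) (line : String) :
    List (String × List String) × Option (String × List String) :=
  if PySem.Str.isIn "Logical Propositions:" line then
    (st.1 ++ st.2.toList, some ("propositions", []))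
  else if PySem.Str.isIn "Logical Relations:" line then
    (st.1 ++ st.2.toList, some ("relations", []))
  else if line ≠ "" then
    match st.2 with
    | some cur => (st.1, some (cur.1, cur.2 ++ [line]))
    | none => st
  else st

def pvStepSec (st : List (String × List String) × Option (String × List String)) (raw : String) :
    List (String × List String) × Option (String × List String) :=
  pvStepSecL st (PySem.Str.strip raw)

-- pass 2 (props): one line of a propositions section
def pvPropLine (d : PySem.Dict String String) (line : String) : PySem.Dict String String :=
  if PySem.Str.isIn ":" line then
    match PySem.Str.splitMax? line ":" 1 with
    | some [left, right] =>
        if PySem.Str.strip left ≠ "" ∧ PySem.Str.strip right ≠ "" then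
          d.insert (PySem.Str.strip left) (PySem.Str.strip right)
        else d
    | _ => d
  else d

def pvPropsPass (secs : List (String × List String)) : PySem.Dict String String :=
  secs.foldl (fun d sec => if sec.1 = "propositions" then sec.2.foldl pvPropLine d else d)
    PySem.Dict.empty

-- pass 3 (relations): the nested comprehension, as a fold appending each filtered body
def pvRelsPass (secs : List (String × List String)) : List String :=
  secs.foldl
    (fun r sec =>
      if sec.1 = "relations" then
        r ++ sec.2.filter (fun line => ¬ PySem.Str.startswith (PySem.Str.lower line) "none")
      else r)
    []

def parse_logical_result_py_alt (result : String) : (List (String × String)) × List String :=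
  let lines := (PySem.Str.split? (PySem.Str.strip result) "\n").getD []  -- sep "\n" ≠ "": never none
  let st := lines.foldl pvStepSec ([], none)
  let sections := st.1 ++ st.2.toList
  ((pvPropsPass sections).items, pvRelsPass sections)

-- ===== PRECONDITION & SPEC =====
def Spec_parse_logical_result_py (result : String) (out : (List (String × String)) × List String) : Prop := out = parse_logical_result_py_alt result
instance (result : String) (out : (List (String × String)) × List String) : Decidable (Spec_parse_logical_result_py result out) := by unfold Spec_parse_logical_result_py; infer_instance

-- ===== CLAIM (what is proved, stated in full; the proofs are below) =====
def Claim_equal_parse_logical_result_py : Prop := ∀ (result : String), Dom_parse_logical_result_py result → Spec_parse_logical_result_py result (parse_logical_result_py result)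

-- ===== LEMMAS AND PROOFS =====

-- the B-state is good when the current section's label is one of the two header labels
def pvGood (st : List (String × List String) × Option (String × List String)) : Prop :=
  ∀ c ∈ st.2, c.1 = "propositions" ∨ c.1 = "relations"

-- A's loop state corresponding to a B-state
def pvOut (st : List (String × List String) × Option (String × List String)) :
    PySem.Dict String String × List String × Option String :=
  (pvPropsPass (st.1 ++ st.2.toList), pvRelsPass (st.1 ++ st.2.toList), st.2.map Prod.fst)

lemma pvPropsPass_append (l m : List (String × List String)) :
    pvPropsPass (l ++ m) =
      m.foldl (fun d sec => if sec.1 = "propositions" then sec.2.foldl pvPropLine d else d)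
        (pvPropsPass l) := by
  simp [pvPropsPass, List.foldl_append]

lemma pvRelsPass_append (l m : List (String × List String)) :
    pvRelsPass (l ++ m) =
      m.foldl
        (fun r sec =>
          if sec.1 = "relations" then
            r ++ sec.2.filter (fun line => ¬ PySem.Str.startswith (PySem.Str.lower line) "none")
          else r)
        (pvRelsPass l) := by
  simp [pvRelsPass, List.foldl_append]

lemma pvGood_stepL (st : List (String × List String) × Option (String × List String))
    (line : String) (h : pvGood st) : pvGood (pvStepSecL st line) := by
  unfold pvStepSecL
  split_ifs with h1 h2 h3
  · intro c hc; rw [Option.mem_def] at hc; cases hc; simp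
  · intro c hc; rw [Option.mem_def] at hc; cases hc; simp
  · cases hcur : st.2 with
    | none => simpa [hcur] using h
    | some cur =>
        intro c hc
        dsimp only at hc
        rw [Option.mem_def] at hc
        cases hc
        simpa using h cur (by simp [hcur])
  · exact h

lemma pvStep_commL (done : List (String × List String)) (cur : Option (String × List String))
    (line : String) (h : pvGood (done, cur)) :
    pvStepAL (pvOut (done, cur)) line = pvOut (pvStepSecL (done, cur) line) := by
  unfold pvStepAL pvStepSecL pvOut
  dsimp only
  by_cases h0 : line = ""
  · subst h0
    rw [if_pos rfl, if_neg (by decide), if_neg (by decide), if_neg (by simp)]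
  · rw [if_neg h0]
    by_cases h1 : PySem.Str.isIn "Logical Propositions:" line = true
    · rw [if_pos h1, if_pos h1]
      simp [pvPropsPass_append, pvRelsPass_append]
    · rw [if_neg h1, if_neg h1]
      by_cases h2 : PySem.Str.isIn "Logical Relations:" line = true
      · rw [if_pos h2, if_pos h2]
        simp [pvPropsPass_append, pvRelsPass_append]
      · rw [if_neg h2, if_neg h2, if_pos h0]
        cases cur with
        | none =>
            dsimp only
            rw [if_neg (by simp), if_neg (by simp)]
        | some cur =>
            dsimp only [Option.map_some, Option.toList_some]
            rcases h cur (by simp) with hl | hl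
            · -- current section is a propositions section
              have hps : pvPropsPass (done ++ [(cur.1, cur.2 ++ [line])])
                  = pvPropLine (pvPropsPass (done ++ [cur])) line := by
                simp [pvPropsPass_append, hl, List.foldl_append]
              have hrs : pvRelsPass (done ++ [(cur.1, cur.2 ++ [line])])
                  = pvRelsPass (done ++ [cur]) := by
                simp [pvRelsPass_append, hl]
              by_cases h3 : PySem.Str.isIn ":" line = true
              · rw [if_pos (⟨by rw [hl], h3⟩ :
                    (some cur.1 = some "propositions" ∧ PySem.Str.isIn ":" line = true))]
                rw [pvPropLine, if_pos h3] at hps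
                cases hsp : PySem.Str.splitMax? line ":" 1 with
                | none => simp [hsp] at hps; simp [hps, hrs]
                | some parts =>
                    match parts with
                    | [] => simp [hsp] at hps; simp [hps, hrs]
                    | [p] => simp [hsp] at hps; simp [hps, hrs]
                    | p0 :: p1 :: p2 :: r => simp [hsp] at hps; simp [hps, hrs]
                    | [p0, p1] =>
                        simp only [hsp] at hps ⊢
                        by_cases h4 : PySem.Str.strip p0 ≠ "" ∧ PySem.Str.strip p1 ≠ ""
                        · rw [if_pos h4] at hps
                          simp only [if_pos h4]
                          simp [hps, hrs]
                        · rw [if_neg h4] at hps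
                          simp only [if_neg h4]
                          simp [hps, hrs]
              · rw [if_neg (fun hco => h3 hco.2),
                    if_neg (fun hco => by rw [hl] at hco; exact absurd hco (by decide))]
                have hps' : pvPropLine (pvPropsPass (done ++ [cur])) line
                    = pvPropsPass (done ++ [cur]) := by
                  unfold pvPropLine; rw [if_neg h3]
                simp [hps, hps', hrs]
            · -- current section is a relations section
              rw [if_neg (fun hco => by rw [hl] at hco; exact absurd hco.1 (by decide)),
                  if_pos (by rw [hl])]
              have hps : pvPropsPass (done ++ [(cur.1, cur.2 ++ [line])])
                  = pvPropsPass (done ++ [cur]) := by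
                simp [pvPropsPass_append, hl]
              by_cases h5 : PySem.Str.startswith (PySem.Str.lower line) "none" = true
              all_goals have h5' := h5
              all_goals simp at h5'
              · rw [if_neg (fun hco => hco.2 h5)]
                have hrs : pvRelsPass (done ++ [(cur.1, cur.2 ++ [line])])
                    = pvRelsPass (done ++ [cur]) := by
                  simp [pvRelsPass_append, hl, List.filter_append, h5']
                simp [hps, hrs]
              · rw [if_pos ⟨h0, h5⟩]
                have hrs : pvRelsPass (done ++ [(cur.1, cur.2 ++ [line])])
                    = pvRelsPass (done ++ [cur]) ++ [line] := by
                  simp [pvRelsPass_append, hl, List.filter_append, h5']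
                simp [hps, hrs]

lemma pvFold_comm (lines : List String)
    (st : List (String × List String) × Option (String × List String)) (h : pvGood st) :
    lines.foldl pvStepA (pvOut st) = pvOut (lines.foldl pvStepSec st) := by
  induction lines generalizing st with
  | nil => rfl
  | cons l ls ih =>
      obtain ⟨d, c⟩ := st
      have hstep : pvStepA (pvOut (d, c)) l = pvOut (pvStepSec (d, c) l) :=
        pvStep_commL d c (PySem.Str.strip l) h
      rw [List.foldl_cons, List.foldl_cons, hstep]
      exact ih _ (pvGood_stepL (d, c) (PySem.Str.strip l) h)

-- ===== VERDICT (by name: the statement is the Claim_ definition above) =====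
theorem parse_logical_result_py_spec : Claim_equal_parse_logical_result_py := by
  intro result _
  show parse_logical_result_py result = parse_logical_result_py_alt result
  have h := pvFold_comm ((PySem.Str.split? (PySem.Str.strip result) "\n").getD [])
    ([], none) (by intro c hc; simp at hc)
  unfold parse_logical_result_py parse_logical_result_py_alt
  dsimp only
  rw [show ((PySem.Dict.empty : PySem.Dict String String), ([] : List String),
        (none : Option String)) = pvOut ([], none) from rfl, h]
  rw [pvOut]
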